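-- pv_equiv track=rewrite | github.com/adventure-space/decode | decode.py | eliasDecoding
-- ===== SOURCE A (Python) =====
-- def eliasDecoding(x: str):
--   '''
--   Разделяем на группы гамма код
--   :param x: строка
--   :return:
--   '''
--   counter = 0
--   s = ""
--   flag = False
--   lst = []
--   for i in x:
--     if i == "0" and not flag:
--       counter += 1
--       s += i
--     elif i == "0" and flag:
--       s += i
--       counter -= 1
--     elif i == "1":
--       if counter > 0 and not flag:
--         s += i
--         flag = True
--       elif counter > 0 and flag:
--         counter -= 1
--         s += i
--     if counter <= 0:
--       if flag:
--         flag = False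
--         lst.append(s)
--         s = ""
--       else:
--         lst.append(i)
--   return lst
-- ===== SOURCE B (Python) =====
-- def eliasDecoding(x: str):
--     """Index-based parser: outer while over position, inner whiles per group."""
--     res = []
--     i = 0
--     n = len(x)
--     while i < n:
--         c = x[i]
--         if c == '1':
--             res.append('1')
--             i += 1
--         elif c != '0':
--             res.append(c)
--             i += 1
--         else:
--             b = 0
--             s = ""
--             while i < n and x[i] != '1':
--                 if x[i] == '0':
--                     b += 1
--                     s += '0'
--                 i += 1
--             if i < n:  # x[i] == '1'
--                 s += '1'
--                 i += 1
--                 k = b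
--                 while i < n and k > 0:
--                     if x[i] == '0' or x[i] == '1':
--                         s += x[i]
--                         k -= 1
--                     i += 1
--                 if k == 0:
--                     res.append(s)
--             # truncated / all-zeros tail: dropped
--     return res
-- ===== Notes on version B (the rewrite author's own statement) =====
-- stated objective: alternative
-- what changed: Replaces A's single character-fold over mutable (counter, s, flag) state with an index-based parser: an outer scan loop and explicit inner phases that count leading zeros and then consume that many payload bits, appending a group only when complete.
import Mathlib
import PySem

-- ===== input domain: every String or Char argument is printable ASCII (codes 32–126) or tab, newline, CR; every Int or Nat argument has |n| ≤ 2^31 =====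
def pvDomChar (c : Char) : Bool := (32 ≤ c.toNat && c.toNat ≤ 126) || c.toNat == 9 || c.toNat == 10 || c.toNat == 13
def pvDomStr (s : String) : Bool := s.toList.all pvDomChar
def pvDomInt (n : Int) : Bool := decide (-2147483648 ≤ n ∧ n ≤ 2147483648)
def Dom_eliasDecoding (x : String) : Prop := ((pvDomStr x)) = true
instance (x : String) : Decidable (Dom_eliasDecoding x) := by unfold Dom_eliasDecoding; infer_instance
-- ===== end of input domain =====

-- B replaces A's single fold over (counter, s, flag) state flags with an index-based
-- parser (outer loop + explicit inner group phases); same result, different decomposition.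

-- ===== PORT A =====
-- one iteration of A's for-loop over the state (counter, s, flag, lst)
def aStep (st : Int × String × Bool × List String) (i : Char) : Int × String × Bool × List String :=
  let c := st.1
  let s := st.2.1
  let f := st.2.2.1
  let lst := st.2.2.2
  let t : Int × String × Bool :=
    if i = '0' ∧ ¬f then (c + 1, s.push i, f)
    else if i = '0' ∧ f then (c - 1, s.push i, f)
    else if i = '1' then
      (if c > 0 ∧ ¬f then (c, s.push i, true)
       else if c > 0 ∧ f then (c - 1, s.push i, f)
       else (c, s, f))
    else (c, s, f)
  if t.1 ≤ 0 then
    (if t.2.2 then (t.1, "", false, lst ++ [t.2.1])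
     else (t.1, t.2.1, t.2.2, lst ++ [String.singleton i]))
  else (t.1, t.2.1, t.2.2, lst)

def eliasDecoding (x : String) : List String :=
  (x.toList.foldl aStep (0, "", false, [])).2.2.2

-- ===== PORT B =====
-- the three phases of Source B's while-loop parser: outer scan, zero-counting, payload
mutual
def altGo : List Char → List String
  | [] => []
  | c :: rest =>
    if c = '1' then "1" :: altGo rest
    else if c ≠ '0' then String.singleton c :: altGo rest
    else altZeros 0 "" (c :: rest)
termination_by l => (l.length, 1)
decreasing_by all_goals (simp_wf; omega)
def altZeros (b : Nat) (s : String) : List Char → List String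
  | [] => []
  | c :: rest =>
    if c = '1' then altPayload b (s.push '1') rest
    else if c = '0' then altZeros (b + 1) (s.push '0') rest
    else altZeros b s rest
termination_by l => (l.length, 0)
decreasing_by all_goals (simp_wf; omega)
def altPayload (k : Nat) (s : String) (l : List Char) : List String :=
  if k = 0 then s :: altGo l
  else match l with
    | [] => []
    | c :: rest =>
      if c = '0' ∨ c = '1' then altPayload (k - 1) (s.push c) rest
      else altPayload k s rest
termination_by (l.length, 2)
decreasing_by all_goals (simp_wf; omega)
end

def eliasDecoding_alt (x : String) : List String := altGo x.toList

-- ===== PRECONDITION & SPEC =====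
def Spec_eliasDecoding (x : String) (out : List String) : Prop := out = eliasDecoding_alt x
instance (x : String) (out : List String) : Decidable (Spec_eliasDecoding x out) := by unfold Spec_eliasDecoding; infer_instance

-- ===== CLAIM (what is proved, stated in full; the proofs are below) =====
def Claim_equal_eliasDecoding : Prop := ∀ (x : String), Dom_eliasDecoding x → Spec_eliasDecoding x (eliasDecoding x)

-- ===== LEMMAS AND PROOFS =====

-- A's counter never goes negative and its flag forces counter ≥ 1; the induction
-- tracks A's three reachable state shapes against B's three parser phases.
theorem main_inv : ∀ (l : List Char) (lst : List String),
    ((l.foldl aStep (0, "", false, lst)).2.2.2 = lst ++ altGo l)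
    ∧ (∀ (b : Nat) (s : String), 1 ≤ b →
        (l.foldl aStep ((b : Int), s, false, lst)).2.2.2 = lst ++ altZeros b s l)
    ∧ (∀ (k : Nat) (s : String), 1 ≤ k →
        (l.foldl aStep ((k : Int), s, true, lst)).2.2.2 = lst ++ altPayload k s l) := by
  have H : ∀ (n : Nat) (l : List Char), l.length ≤ n → ∀ (lst : List String),
      ((l.foldl aStep (0, "", false, lst)).2.2.2 = lst ++ altGo l)
      ∧ (∀ (b : Nat) (s : String), 1 ≤ b →
          (l.foldl aStep ((b : Int), s, false, lst)).2.2.2 = lst ++ altZeros b s l)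
      ∧ (∀ (k : Nat) (s : String), 1 ≤ k →
          (l.foldl aStep ((k : Int), s, true, lst)).2.2.2 = lst ++ altPayload k s l) := by
    intro n
    induction n with
    | zero =>
      intro l hl lst
      have hnil : l = [] := List.eq_nil_of_length_eq_zero (Nat.le_zero.mp hl)
      subst hnil
      refine ⟨by simp [altGo], fun b s hb => by simp [altZeros], fun k s hk => ?_⟩
      have hk0 : k ≠ 0 := by omega
      simp [altPayload, hk0]
    | succ n ih =>
      intro l hl lst
      match l with
      | [] =>
        refine ⟨by simp [altGo], fun b s hb => by simp [altZeros], fun k s hk => ?_⟩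
        have hk0 : k ≠ 0 := by omega
        simp [altPayload, hk0]
      | i :: rest =>
        have hr : rest.length ≤ n := by simp at hl; omega
        refine ⟨?_, ?_, ?_⟩
        · -- idle state
          by_cases h0 : i = '0'
          · subst h0
            have hstep : aStep (0, "", false, lst) '0'
                = (((1 : Nat) : Int), String.push "" '0', false, lst) := by
              simp [aStep]
            rw [List.foldl_cons, hstep, (ih rest hr lst).2.1 1 (String.push "" '0') le_rfl]
            simp [altGo, altZeros]
          · by_cases h1 : i = '1'
            · subst h1
              have hstep : aStep (0, "", false, lst) '1'
                  = (0, "", false, lst ++ [String.singleton '1']) := by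
                simp [aStep]
              rw [List.foldl_cons, hstep, (ih rest hr _).1]
              simp [altGo]
              rfl
            · have hstep : aStep (0, "", false, lst) i
                  = (0, "", false, lst ++ [String.singleton i]) := by
                simp [aStep, h0, h1]
              rw [List.foldl_cons, hstep, (ih rest hr _).1]
              simp [altGo, h0, h1]
        · -- zero-counting state
          intro b s hb
          by_cases h0 : i = '0'
          · subst h0
            have hstep : aStep ((b : Int), s, false, lst) '0'
                = ((((b + 1 : Nat)) : Int), s.push '0', false, lst) := by
              simp [aStep]
            rw [List.foldl_cons, hstep, (ih rest hr lst).2.1 (b + 1) (s.push '0') (by omega)]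
            simp [altZeros]
          · by_cases h1 : i = '1'
            · subst h1
              have hstep : aStep ((b : Int), s, false, lst) '1'
                  = ((b : Int), s.push '1', true, lst) := by
                have hbpos : 0 < b := hb
                simp [aStep, hbpos]
                all_goals omega
              rw [List.foldl_cons, hstep, (ih rest hr lst).2.2 b (s.push '1') hb]
              simp [altZeros]
            · have hstep : aStep ((b : Int), s, false, lst) i
                  = ((b : Int), s, false, lst) := by
                simp [aStep, h0, h1]
                all_goals omega
              rw [List.foldl_cons, hstep, (ih rest hr lst).2.1 b s hb]
              simp [altZeros, h0, h1]
        · -- payload state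
          intro k s hk
          by_cases hc : i = '0' ∨ i = '1'
          · have hkne : k ≠ 0 := by omega
            have hstep : aStep ((k : Int), s, true, lst) i
                = if k = 1 then (0, "", false, lst ++ [s.push i])
                  else (((k - 1 : Nat) : Int), s.push i, true, lst) := by
              by_cases hk1 : k = 1
              · subst hk1
                rcases hc with hc | hc <;> subst hc <;> simp [aStep]
              · rw [if_neg hk1]
                have hkpos : 0 < k := by omega
                have hns : ¬ ((k : Int) - 1 ≤ 0) := by omega
                rcases hc with hc | hc <;> subst hc <;>
                  simp [aStep, hkpos, hns]
            rw [List.foldl_cons, hstep]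
            by_cases hk1 : k = 1
            · subst hk1
              rw [if_pos rfl, (ih rest hr _).1]
              rcases hc with hc | hc <;> subst hc <;>
                · simp [altPayload]
                  rw [altPayload.eq_def]
                  simp
            · rw [if_neg hk1, (ih rest hr lst).2.2 (k - 1) (s.push i) (by omega)]
              conv_rhs => rw [altPayload]
              rcases hc with hc | hc <;> subst hc <;> simp [hkne]
          · rw [not_or] at hc
            have hstep : aStep ((k : Int), s, true, lst) i
                = ((k : Int), s, true, lst) := by
              simp [aStep, hc.1, hc.2]
              all_goals omega
            rw [List.foldl_cons, hstep, (ih rest hr lst).2.2 k s hk]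
            have hkne : k ≠ 0 := by omega
            conv_rhs => rw [altPayload]
            simp [hkne, hc.1, hc.2]
  exact fun l lst => H l.length l le_rfl lst

-- ===== VERDICT (by name: the statement is the Claim_ definition above) =====
theorem eliasDecoding_spec : Claim_equal_eliasDecoding := by
  intro x _
  unfold Spec_eliasDecoding eliasDecoding eliasDecoding_alt
  simpa using (main_inv x.toList []).1
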